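-- pv_equiv track=rewrite | github.com/yandex/ch-tools | ch_tools/chadmin/internal/zookeeper.py | _remove_subpaths
-- ===== SOURCE A (Python) =====
-- def _remove_subpaths(paths):
--     """
--     Removing from the list paths that are subpath of another.
--
--     Example:
--     [/a, /a/b/c<-remove it]
--     """
--     if not paths:
--         return
--     # Sorting the list in the lexicographic order
--     paths.sort()
--     paths = [path.split("/") for path in paths]
--     normalized_paths = [paths[0]]
--     # If path[i] has subnode path[j] then all paths from i to j will be subnode of i.
--     for path in paths:
--         last = normalized_paths[-1]
--         # Ignore the path if the last normalized one is its prefix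
--         if len(last) > len(path) or path[: len(last)] != last:
--             normalized_paths.append(path)
--     return ["/".join(path) for path in normalized_paths]
-- ===== SOURCE B (Python) =====
-- def _remove_subpaths(paths):
--     """
--     Removing from the list paths that are subpath of another.
--
--     Example:
--     [/a, /a/b/c<-remove it]
--     """
--     if not paths:
--         return
--     # Sorting the list in the lexicographic order (in place, as the caller expects)
--     paths.sort()
--     present = set(paths)
--     result = []
--     prev = None
--     for path in paths:
--         if path != prev:
--             comps = path.split("/")
--             ancestors = ["/".join(comps[:i]) for i in range(1, len(comps))]
--             if not any(a in present for a in ancestors):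
--                 result.append(path)
--         prev = path
--     return result
-- ===== Notes on version B (the rewrite author's own statement) =====
-- stated objective: alternative
-- what changed: Replaces A's sequential compare-each-path-with-the-last-kept-component-list pass by an independent per-path test: build a hash set of all paths once, and keep a path (after skipping duplicates of the previous sorted element) iff none of its proper ancestor prefixes is in that set; this also fixes A's missed removals when the sort order separates an ancestor from its descendant.
-- intended difference: On inputs where some path p has a proper slash-ancestor q in the list but every such ancestor is separated from p in lexicographic sort order by an intervening path not under it (witness input ['/a', '/a!', '/a/b']), A's compare-with-last-kept chain is broken and A returns the list still containing the subpath p, while B returns it with p removed, which is the function's stated purpose of removing paths that are subpaths of another. — e.g. on _remove_subpaths(["/a", "/a!", "/a/b"]): A returns some ["/a", "/a!", "/a/b"], B returns some ["/a", "/a!"]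
import Mathlib
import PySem

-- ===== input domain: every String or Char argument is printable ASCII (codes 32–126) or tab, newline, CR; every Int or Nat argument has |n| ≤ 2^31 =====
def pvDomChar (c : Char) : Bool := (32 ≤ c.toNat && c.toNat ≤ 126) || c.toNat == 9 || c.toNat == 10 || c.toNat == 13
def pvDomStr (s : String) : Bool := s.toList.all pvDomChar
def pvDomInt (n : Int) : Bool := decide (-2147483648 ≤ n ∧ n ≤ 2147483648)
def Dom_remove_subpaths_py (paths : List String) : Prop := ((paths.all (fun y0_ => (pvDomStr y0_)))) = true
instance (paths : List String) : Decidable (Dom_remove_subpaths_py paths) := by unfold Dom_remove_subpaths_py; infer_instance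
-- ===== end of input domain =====

-- B replaces A's compare-with-last-kept pass by a per-path membership test of the path's proper
-- ancestor prefixes in a set of all paths; on inputs where lexicographic sorting separates an
-- ancestor from its descendant A misses the removal and B performs it (intended fix, see D_ below).
-- Both A and B sort the caller's list in place; the equivalence proved here is about the return value.

-- ===== PORT A =====
-- literal port of A: sort; split every path on "/"; start with paths[0]; append each path whose
-- component list does not extend the last kept one; join the kept component lists back.
def remove_subpaths_py (paths : List String) : Option (List String) :=
  if paths.isEmpty then none
  else
    let sortedPaths := PySem.List.sorted paths (fun x => x) false
    -- path.split("/") on code points (PySem.Chars.splitOn = Python str.split with nonempty sep)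
    let comps := sortedPaths.map (fun p => PySem.Chars.splitOn p.toList ['/'])
    -- for path in paths: last = normalized_paths[-1]; if len(last) > len(path) or path[:len(last)] != last: append
    -- (the accumulator is never empty, so normalized_paths[-1] is its getLast!; path[:n] with n = len(last) ≥ 0 is List.take n)
    let norm := comps.foldl
      (fun acc path =>
        let last := acc.getLast!
        if last.length > path.length ∨ path.take last.length ≠ last then acc ++ [path] else acc)
      [comps.head!]
    some (norm.map (fun path => String.ofList (PySem.Chars.join ['/'] path)))

-- ===== PORT B =====
-- ["/".join(comps[:i]) for i in range(1, len(comps))] with comps = path.split("/")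
def altAncestors (path : String) : List String :=
  let comps := PySem.Chars.splitOn path.toList ['/']
  (PySem.List.pyRange 1 comps.length 1).map
    (fun i => String.ofList (PySem.Chars.join ['/'] (PySem.List.slice comps none (some i))))

-- one iteration of Source B's for-loop; state = (result, prev)
def altStep (present : PySem.Set String) (st : List String × Option String) (path : String) :
    List String × Option String :=
  if some path ≠ st.2 then
    if (altAncestors path).any (fun a => PySem.Set.contains present a) then (st.1, some path)
    else (st.1 ++ [path], some path)
  else (st.1, some path)

def remove_subpaths_py_alt (paths : List String) : Option (List String) :=
  if paths.isEmpty then none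
  else
    let sortedPaths := PySem.List.sorted paths (fun x => x) false
    let present : PySem.Set String := PySem.Set.ofList sortedPaths
    some (sortedPaths.foldl (altStep present) ([], none)).1

-- ===== PRECONDITION & SPEC =====
-- q is a proper path-ancestor of p: q + "/" is a string prefix of p
def ancStr (q p : String) : Bool := PySem.Str.startswith p (q ++ "/")

-- On inputs where some path p has a proper slash-ancestor q in the list but every such ancestor is
-- separated from p in lexicographic sort order by an intervening path not under it, A's
-- compare-with-last-kept chain breaks and A returns the subpath p too, while B removes it — which
-- is the function's stated purpose (removing paths that are subpaths of another).
def D_remove_subpaths_py (paths : List String) : Prop :=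
  ∃ p ∈ paths, (∃ q ∈ paths, ancStr q p) ∧
    ∀ q ∈ paths, ancStr q p → ∃ r ∈ paths, q < r ∧ r < p ∧ ¬ ancStr q r
instance (paths : List String) : Decidable (D_remove_subpaths_py paths) := by
  unfold D_remove_subpaths_py; infer_instance

def Spec_remove_subpaths_py (paths : List String) (out : Option (List String)) : Prop :=
  ¬ D_remove_subpaths_py paths → out = remove_subpaths_py_alt paths
instance (paths : List String) (out : Option (List String)) : Decidable (Spec_remove_subpaths_py paths out) := by
  unfold Spec_remove_subpaths_py; infer_instance

def pvDiffWitness_remove_subpaths_py : List String := ["/a", "/a!", "/a/b"]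
def pvDiffWitnessOut_remove_subpaths_py : (Option (List String)) × (Option (List String)) :=
  (some ["/a", "/a!", "/a/b"], some ["/a", "/a!"])

-- ===== CLAIM (what is proved, stated in full; the proofs are below) =====
def Claim_unchanged_remove_subpaths_py : Prop :=
  ∀ (paths : List String), Dom_remove_subpaths_py paths →
    Spec_remove_subpaths_py paths (remove_subpaths_py paths)
def Claim_changed_remove_subpaths_py : Prop :=
  Dom_remove_subpaths_py (pvDiffWitness_remove_subpaths_py) ∧
  D_remove_subpaths_py (pvDiffWitness_remove_subpaths_py) ∧
  remove_subpaths_py (pvDiffWitness_remove_subpaths_py) = pvDiffWitnessOut_remove_subpaths_py.1 ∧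
  remove_subpaths_py_alt (pvDiffWitness_remove_subpaths_py) = pvDiffWitnessOut_remove_subpaths_py.2 ∧
  pvDiffWitnessOut_remove_subpaths_py.1 ≠ pvDiffWitnessOut_remove_subpaths_py.2
def Claim_exact_remove_subpaths_py : Prop :=
  ∀ (paths : List String), Dom_remove_subpaths_py paths → D_remove_subpaths_py paths →
    remove_subpaths_py paths ≠ remove_subpaths_py_alt paths

-- ===== LEMMAS AND PROOFS =====

-- ---- the component-split model of path.split("/") (shared by both sides' proofs) ----
def mySplit : List Char → List (List Char)
  | [] => [[]]
  | c :: t => if c = '/' then [] :: mySplit t else (mySplit t).modifyHead (c :: ·)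

theorem mySplit_ne_nil (cs : List Char) : mySplit cs ≠ [] := by
  cases cs with
  | nil => simp [mySplit]
  | cons c t =>
    simp only [mySplit]
    split
    · simp
    · have := mySplit_ne_nil t
      cases h : mySplit t with
      | nil => exact absurd h this
      | cons a r => simp

theorem splitOn_go_spec (fuel : Nat) (l cur : List Char) (acc : List (List Char)) (hf : l.length < fuel) :
    PySem.Chars.splitOn.go ['/'] fuel l cur acc
      = acc.reverse ++ (mySplit l).modifyHead (cur.reverse ++ ·) := by
  induction fuel generalizing l cur acc with
  | zero => omega
  | succ f ih =>
    cases l with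
    | nil =>
      rw [PySem.Chars.splitOn.go]
      · simp [mySplit]
      · omega
    | cons c t =>
      rw [PySem.Chars.splitOn.go]
      by_cases hc : c = '/'
      · subst hc
        simp only [List.isPrefixOf, List.length_cons] at *
        rw [if_pos (by simp)]
        simp only [List.length_nil, Nat.zero_add, List.drop_succ_cons, List.drop_zero]
        rw [ih t [] (cur.reverse :: acc) (by simp at hf; omega)]
        obtain ⟨a, r, hr⟩ := List.exists_cons_of_ne_nil (mySplit_ne_nil t)
        simp [mySplit, hr]
      · rw [if_neg (by simp [Ne.symm hc])]
        rw [ih t (c :: cur) acc (by simp at hf; omega)]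
        obtain ⟨a, r, hr⟩ := List.exists_cons_of_ne_nil (mySplit_ne_nil t)
        simp [mySplit, hr, hc]

theorem splitOn_eq_mySplit (cs : List Char) : PySem.Chars.splitOn cs ['/'] = mySplit cs := by
  rw [PySem.Chars.splitOn, splitOn_go_spec _ _ _ _ (by omega)]
  obtain ⟨a, r, hr⟩ := List.exists_cons_of_ne_nil (mySplit_ne_nil cs)
  simp [hr]

theorem join_modifyHead (c : Char) (a : List Char) (r : List (List Char)) :
    PySem.Chars.join ['/'] ((a :: r).modifyHead (c :: ·)) = c :: PySem.Chars.join ['/'] (a :: r) := by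
  cases r with
  | nil => simp [PySem.Chars.join, List.intercalate]
  | cons b r' => simp [PySem.Chars.join, List.intercalate]

theorem join_mySplit (cs : List Char) : PySem.Chars.join ['/'] (mySplit cs) = cs := by
  induction cs with
  | nil => simp [mySplit, PySem.Chars.join, List.intercalate]
  | cons c t ih =>
    obtain ⟨a, r, hr⟩ := List.exists_cons_of_ne_nil (mySplit_ne_nil t)
    by_cases hc : c = '/'
    · subst hc
      rw [mySplit, if_pos rfl]
      rw [hr] at ih ⊢
      simp [PySem.Chars.join, List.intercalate] at ih ⊢
      exact ih
    · rw [mySplit, if_neg hc, hr, join_modifyHead, ← hr, ih]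

theorem mySplit_nil : mySplit [] = [[]] := rfl

theorem mySplit_slash (t : List Char) : mySplit ('/' :: t) = [] :: mySplit t := by
  simp [mySplit]

theorem mySplit_cons (c : Char) (t : List Char) (hc : c ≠ '/') (x : List Char)
    (xs : List (List Char)) (hx : mySplit t = x :: xs) :
    mySplit (c :: t) = (c :: x) :: xs := by
  simp [mySplit, hc, hx]

theorem mySplit_prefix_iff (a b : List Char) :
    mySplit a <+: mySplit b ↔ (a = b ∨ a ++ ['/'] <+: b) := by
  induction a generalizing b with
  | nil =>
    cases b with
    | nil => simp [mySplit]
    | cons d u =>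
      by_cases hd : d = '/'
      · subst hd
        rw [mySplit_slash]
        simp only [mySplit]
        constructor
        · intro _; right; exact ⟨u, rfl⟩
        · intro _; exact List.cons_prefix_cons.mpr ⟨rfl, List.nil_prefix⟩
      · obtain ⟨y, ys, hy⟩ := List.exists_cons_of_ne_nil (mySplit_ne_nil u)
        rw [mySplit_cons d u hd y ys hy]
        simp only [mySplit, List.cons_prefix_cons, List.nil_append]
        constructor
        · rintro ⟨h, -⟩; exact absurd h (by simp)
        · rintro (h | h)
          · exact absurd h (by simp)
          · exact absurd h.1.symm hd
  | cons c s ih =>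
    cases b with
    | nil =>
      rw [mySplit_nil]
      constructor
      · intro h
        obtain ⟨x, xs, hx⟩ := List.exists_cons_of_ne_nil (mySplit_ne_nil s)
        by_cases hc : c = '/'
        · subst hc
          rw [mySplit_slash, hx] at h
          have := h.length_le
          simp at this
        · rw [mySplit_cons c s hc x xs hx] at h
          have := List.cons_prefix_cons.mp h
          exact absurd this.1 (by simp)
      · rintro (h | ⟨v, hv⟩)
        · exact absurd h (by simp)
        · exact absurd hv (by simp)
    | cons d u =>
      obtain ⟨x, xs, hx⟩ := List.exists_cons_of_ne_nil (mySplit_ne_nil s)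
      obtain ⟨y, ys, hy⟩ := List.exists_cons_of_ne_nil (mySplit_ne_nil u)
      have hiff : x :: xs <+: y :: ys ↔ (s = u ∨ s ++ ['/'] <+: u) := by
        rw [← hx, ← hy]; exact ih u
      by_cases hc : c = '/' <;> by_cases hd : d = '/'
      · subst hc; subst hd
        rw [mySplit_slash, mySplit_slash, List.cons_prefix_cons, hx, hy, hiff]
        constructor
        · rintro ⟨-, h | h⟩
          · left; rw [h]
          · right; exact List.cons_prefix_cons.mpr ⟨rfl, h⟩
        · rintro (h | h)
          · exact ⟨rfl, Or.inl (by injection h)⟩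
          · exact ⟨rfl, Or.inr (List.cons_prefix_cons.mp h).2⟩
      · subst hc
        rw [mySplit_slash, mySplit_cons d u hd y ys hy, List.cons_prefix_cons]
        constructor
        · rintro ⟨h, -⟩; exact absurd h (by simp)
        · rintro (h | h)
          · exact absurd (by injection h : '/' = d) (Ne.symm hd)
          · exact absurd ((List.cons_prefix_cons.mp h).1) (Ne.symm hd)
      · subst hd
        rw [mySplit_cons c s hc x xs hx, mySplit_slash, List.cons_prefix_cons]
        constructor
        · rintro ⟨h, -⟩; exact absurd h (by simp)
        · rintro (h | h)
          · exact absurd (by injection h : c = '/') hc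
          · exact absurd ((List.cons_prefix_cons.mp h).1) hc
      · rw [mySplit_cons c s hc x xs hx, mySplit_cons d u hd y ys hy,
          List.cons_prefix_cons]
        constructor
        · rintro ⟨h, hps⟩
          obtain ⟨hcd, hxy⟩ := List.cons_eq_cons.mp h
          rcases hiff.mp (by rw [hxy]; exact List.cons_prefix_cons.mpr ⟨rfl, hps⟩) with h' | h'
          · left; rw [hcd, h']
          · right; exact List.cons_prefix_cons.mpr ⟨hcd, h'⟩
        · rintro (h | h)
          · obtain ⟨hcd, hsu⟩ := List.cons_eq_cons.mp h
            subst hsu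
            rw [hx] at hy
            obtain ⟨h1, h2⟩ := List.cons_eq_cons.mp hy
            exact ⟨by rw [hcd, h1], by rw [h2]⟩
          · obtain ⟨hcd, h'⟩ := List.cons_prefix_cons.mp h
            have := hiff.mpr (Or.inr h')
            obtain ⟨h1, h2⟩ := List.cons_prefix_cons.mp this
            exact ⟨by rw [hcd, h1], h2⟩

-- ---- A's loop body on component lists, and the string-level model altLoop of A's whole pass ----
def gstep (acc : List (List (List Char))) (path : List (List Char)) : List (List (List Char)) :=
  let last := acc.getLast!
  if last.length > path.length ∨ path.take last.length ≠ last then acc ++ [path] else acc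

theorem condA_iff (l p : List (List Char)) :
    (l.length > p.length ∨ p.take l.length ≠ l) ↔ ¬ l <+: p := by
  rw [List.prefix_iff_eq_take]
  constructor
  · rintro (h | h) heq
    · have := congrArg List.length heq
      simp at this
      omega
    · exact h heq.symm
  · intro h
    right
    exact fun hh => h hh.symm

theorem gstep_single (k q : List (List Char)) :
    gstep [k] q = if k.length > q.length ∨ q.take k.length ≠ k then [k] ++ [q] else [k] := by
  simp [gstep]

theorem foldl_gstep_shift (l : List (List (List Char))) (acc : List (List (List Char))) (k : List (List Char)) :
    List.foldl gstep (acc ++ [k]) l = acc ++ List.foldl gstep [k] l := by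
  induction l generalizing acc k with
  | nil => simp
  | cons q l' ih =>
    simp only [List.foldl_cons]
    have hg : gstep (acc ++ [k]) q
        = if k.length > q.length ∨ q.take k.length ≠ k then (acc ++ [k]) ++ [q] else acc ++ [k] := by
      simp [gstep]
    by_cases hc : k.length > q.length ∨ q.take k.length ≠ k
    · rw [hg, if_pos hc, gstep_single, if_pos hc, ih (acc ++ [k]) q,
        show ([k] ++ [q] : List (List (List Char))) = [k] ++ [q] from rfl, ih [k] q, List.append_assoc]
    · rw [hg, if_neg hc, gstep_single, if_neg hc, ih acc k]

-- last kept ⊑ path (equal or component-prefix), as A's branch condition decides it on strings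
def altSkip (h p : String) : Bool :=
  p.toList == h.toList || PySem.Chars.startswith p.toList (h.toList ++ ['/'])

-- string-level model of A's greedy pass over the sorted list
def altLoop : List String → List String
  | [] => []
  | h :: t => h :: altLoop (t.dropWhile (altSkip h))
termination_by l => l.length
decreasing_by
  simpa using Nat.lt_succ_of_le (List.length_dropWhile_le (altSkip h) t)

theorem altSkip_iff (h p : String) :
    altSkip h p = true ↔ mySplit h.toList <+: mySplit p.toList := by
  rw [mySplit_prefix_iff]
  simp only [altSkip, Bool.or_eq_true, beq_iff_eq, PySem.Chars.startswith_iff]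
  constructor
  · rintro (h1 | h1)
    · left; rw [h1]
    · right; exact h1
  · rintro (h1 | h1)
    · left; rw [h1]
    · right; exact h1

theorem altLoop_cons_cons (h p : String) (t : List String) :
    altLoop (h :: p :: t) = if altSkip h p then altLoop (h :: t) else h :: altLoop (p :: t) := by
  by_cases hs : altSkip h p <;> simp [altLoop, hs]

theorem foldl_eq_altLoop (xs : List String) (h : String) :
    List.foldl gstep [mySplit h.toList] (xs.map (fun p => mySplit p.toList))
      = (altLoop (h :: xs)).map (fun p => mySplit p.toList) := by
  induction xs generalizing h with
  | nil => simp [altLoop]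
  | cons p t ih =>
    simp only [List.map_cons, List.foldl_cons]
    by_cases hs : altSkip h p
    · have hpref := (altSkip_iff h p).mp hs
      rw [gstep_single, if_neg (by rw [condA_iff]; exact not_not_intro hpref),
        ih h, altLoop_cons_cons, if_pos hs]
    · have hpref : ¬ mySplit h.toList <+: mySplit p.toList := fun hh =>
        hs ((altSkip_iff h p).mpr hh)
      rw [gstep_single, if_pos ((condA_iff _ _).mpr hpref),
        show ([mySplit h.toList] ++ [mySplit p.toList] : List (List (List Char)))
          = [mySplit h.toList] ++ [mySplit p.toList] from rfl,
        foldl_gstep_shift, ih p, altLoop_cons_cons, if_neg hs, List.map_cons]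
      simp

theorem A_eq_model (paths : List String) :
    remove_subpaths_py paths
      = if paths.isEmpty then none
        else some (altLoop (PySem.List.sorted paths (fun x => x) false)) := by
  unfold remove_subpaths_py
  by_cases hp : paths.isEmpty
  · simp [hp]
  · rw [if_neg hp, if_neg hp]
    have hsne : PySem.List.sorted paths (fun x => x) false ≠ [] := by
      rw [Ne, PySem.List.sorted_eq_nil_iff]
      intro h
      rw [h] at hp
      exact hp rfl
    obtain ⟨s0, ss, hss⟩ := List.exists_cons_of_ne_nil hsne
    rw [hss]
    dsimp only
    have hmap : (s0 :: ss).map (fun p => PySem.Chars.splitOn p.toList ['/'])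
        = (s0 :: ss).map (fun p => mySplit p.toList) := by
      simp [splitOn_eq_mySplit]
    rw [hmap]
    show some ((List.foldl gstep [((s0 :: ss).map (fun p => mySplit p.toList)).head!]
        ((s0 :: ss).map (fun p => mySplit p.toList))).map
        (fun path => String.ofList (PySem.Chars.join ['/'] path)))
      = some (altLoop (s0 :: ss))
    simp only [List.map_cons, List.head!_cons, List.foldl_cons]
    have hfirst : gstep [mySplit s0.toList] (mySplit s0.toList) = [mySplit s0.toList] := by
      rw [gstep_single, if_neg]
      rw [condA_iff]
      exact not_not_intro List.prefix_rfl
    rw [hfirst, foldl_eq_altLoop ss s0, List.map_map]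
    congr 1
    have hid : ((fun path => String.ofList (PySem.Chars.join ['/'] path)) ∘ fun (p : String) => mySplit p.toList)
        = fun (p : String) => p := by
      funext p
      simp [Function.comp, join_mySplit]
    rw [hid, List.map_id']

-- ---- B's per-path ancestor test and the model bLoop of B's whole pass ----
def bTest (present : PySem.Set String) (path : String) : Bool :=
  (altAncestors path).any (fun a => PySem.Set.contains present a)

def bLoop (present : PySem.Set String) : Option String → List String → List String
  | _, [] => []
  | prev, p :: t =>
    if some p ≠ prev ∧ bTest present p = false then p :: bLoop present (some p) t
    else bLoop present (some p) t

theorem foldl_altStep (present : PySem.Set String) (t : List String) :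
    ∀ (acc : List String) (prev : Option String),
      (t.foldl (altStep present) (acc, prev)).1 = acc ++ bLoop present prev t := by
  induction t with
  | nil => intro acc prev; simp [bLoop]
  | cons p t ih =>
    intro acc prev
    simp only [List.foldl_cons]
    by_cases h1 : some p = prev
    · have hstep : altStep present (acc, prev) p = (acc, some p) := by
        simp [altStep, h1]
      rw [hstep, ih, bLoop, if_neg (by simp [h1])]
    · by_cases h2 : bTest present p = true
      · have h2' : (altAncestors p).any (fun a => PySem.Set.contains present a) = true := h2
        have hstep : altStep present (acc, prev) p = (acc, some p) := by
          simp only [altStep]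
          rw [if_pos (show some p ≠ prev from h1), if_pos h2']
        rw [hstep, ih, bLoop, if_neg (by simp [h2])]
      · have h2' : (altAncestors p).any (fun a => PySem.Set.contains present a) = false := by
          simpa [bTest] using h2
        have hstep : altStep present (acc, prev) p = (acc ++ [p], some p) := by
          simp only [altStep]
          rw [if_pos (show some p ≠ prev from h1),
            if_neg (fun hcon => by rw [h2'] at hcon; exact Bool.noConfusion hcon)]
        rw [hstep, ih, bLoop, if_pos ⟨h1, by simpa [bTest] using h2⟩]
        simp

theorem B_eq_model (paths : List String) :
    remove_subpaths_py_alt paths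
      = if paths.isEmpty then none
        else some (bLoop (PySem.Set.ofList (PySem.List.sorted paths (fun x => x) false)) none
                    (PySem.List.sorted paths (fun x => x) false)) := by
  unfold remove_subpaths_py_alt
  by_cases hp : paths.isEmpty
  · simp [hp]
  · rw [if_neg hp, if_neg hp]
    dsimp only
    rw [foldl_altStep]
    simp

-- ---- altAncestors enumerates exactly the proper slash-ancestors ----
theorem join_append_cons (xs : List (List Char)) (y : List Char) (ys : List (List Char)) (hxs : xs ≠ []) :
    PySem.Chars.join ['/'] (xs ++ y :: ys)
      = PySem.Chars.join ['/'] xs ++ '/' :: PySem.Chars.join ['/'] (y :: ys) := by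
  induction xs with
  | nil => exact absurd rfl hxs
  | cons a xs ih =>
    cases xs with
    | nil =>
      rw [List.singleton_append, PySem.Chars.join_cons_cons, PySem.Chars.join_singleton]
      simp
    | cons b xs' =>
      have ih' := ih (List.cons_ne_nil b xs')
      simp only [List.cons_append] at ih' ⊢
      rw [PySem.Chars.join_cons_cons, ih', PySem.Chars.join_cons_cons, List.append_assoc]
      simp

theorem ancStr_iff (q p : String) : ancStr q p = true ↔ q.toList ++ ['/'] <+: p.toList := by
  rw [ancStr, PySem.Str.startswith_eq, PySem.Chars.startswith_iff, String.toList_append]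
  rfl

theorem mem_altAncestors (a p : String) : a ∈ altAncestors p ↔ ancStr a p = true := by
  unfold altAncestors
  rw [splitOn_eq_mySplit]
  have hjoin : PySem.Chars.join ['/'] (mySplit p.toList) = p.toList := join_mySplit _
  constructor
  · intro ha
    obtain ⟨i, hi, hfa⟩ := List.mem_map.mp ha
    rw [PySem.List.mem_pyRange_one] at hi
    obtain ⟨hi1, hi2⟩ := hi
    rw [show PySem.List.slice (mySplit p.toList) none (some i) = (mySplit p.toList).take i.toNat
      from PySem.List.slice_to _ (by omega)] at hfa
    set j := i.toNat with hj
    have hj1 : 1 ≤ j := by omega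
    have hjk : j < (mySplit p.toList).length := by omega
    have htne : (mySplit p.toList).take j ≠ [] := by
      intro h
      have hlen := congrArg List.length h
      rw [List.length_take] at hlen
      simp only [List.length_nil] at hlen
      omega
    have hdne : (mySplit p.toList).drop j ≠ [] := by
      intro h
      have hlen := congrArg List.length h
      rw [List.length_drop] at hlen
      simp only [List.length_nil] at hlen
      omega
    obtain ⟨y, ys, hdrop⟩ := List.exists_cons_of_ne_nil hdne
    have hsplit : p.toList
        = PySem.Chars.join ['/'] ((mySplit p.toList).take j)
          ++ '/' :: PySem.Chars.join ['/'] (y :: ys) := by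
      conv_lhs => rw [← hjoin, ← List.take_append_drop j (mySplit p.toList), hdrop]
      exact join_append_cons _ _ _ htne
    rw [ancStr_iff, ← hfa, String.toList_ofList]
    refine ⟨PySem.Chars.join ['/'] (y :: ys), ?_⟩
    conv_rhs => rw [hsplit]
    simp
  · intro h
    have hpre : a.toList ++ ['/'] <+: p.toList := (ancStr_iff a p).mp h
    have hms : mySplit a.toList <+: mySplit p.toList :=
      (mySplit_prefix_iff _ _).mpr (Or.inr hpre)
    set j := (mySplit a.toList).length with hjdef
    have hj1 : 1 ≤ j := by
      obtain ⟨z, zs, hz⟩ := List.exists_cons_of_ne_nil (mySplit_ne_nil a.toList)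
      rw [hjdef, hz]
      simp
    have htake : mySplit a.toList = (mySplit p.toList).take j :=
      List.prefix_iff_eq_take.mp hms
    have hjle : j ≤ (mySplit p.toList).length := hms.length_le
    have hjk : j < (mySplit p.toList).length := by
      rcases lt_or_eq_of_le hjle with h' | h'
      · exact h'
      · exfalso
        rw [h', List.take_length] at htake
        have hax : a.toList = p.toList := by
          have := congrArg (PySem.Chars.join ['/']) htake
          rwa [join_mySplit, hjoin] at this
        rw [hax] at hpre
        have := hpre.length_le
        simp at this
    refine List.mem_map.mpr ⟨(j : Int), ?_, ?_⟩
    · rw [PySem.List.mem_pyRange_one]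
      omega
    · rw [show PySem.List.slice (mySplit p.toList) none (some (j : Int))
            = (mySplit p.toList).take ((j : Int)).toNat
          from PySem.List.slice_to _ (by omega), Int.toNat_natCast, ← htake, join_mySplit,
        String.ofList_toList]

theorem bTest_iff (s : List String) (x : String) :
    bTest (PySem.Set.ofList s) x = true ↔ ∃ q ∈ s, ancStr q x = true := by
  constructor
  · intro h
    rw [bTest, List.any_eq_true] at h
    obtain ⟨a, ha, hc⟩ := h
    exact ⟨a, (PySem.Set.mem_ofList _ _).mp ((PySem.Set.contains_iff _ _).mp hc),
      (mem_altAncestors a x).mp ha⟩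
  · rintro ⟨q, hq, hanc⟩
    rw [bTest, List.any_eq_true]
    exact ⟨q, (mem_altAncestors q x).mpr hanc,
      (PySem.Set.contains_iff _ _).mpr ((PySem.Set.mem_ofList _ _).mpr hq)⟩

-- ---- order facts ----
theorem chars_lt_append (l : List Char) (c : Char) (t : List Char) : l < l ++ c :: t := by
  refine (List.lt_iff_lex_lt l (l ++ c :: t)).mpr ?_
  induction l with
  | nil => exact List.Lex.nil
  | cons a l ih => exact List.Lex.cons ih

theorem anc_lt (q p : String) (h : ancStr q p = true) : q < p := by
  rw [ancStr_iff] at h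
  obtain ⟨t, ht⟩ := h
  rw [String.lt_iff_toList_lt]
  have hp : p.toList = q.toList ++ '/' :: t := by simpa using ht.symm
  rw [hp]
  exact chars_lt_append _ _ _

theorem altSkip_of_anc (h p : String) (ha : ancStr h p = true) : altSkip h p = true := by
  rw [altSkip, Bool.or_eq_true]
  exact Or.inr ((PySem.Chars.startswith_iff _ _).mpr ((ancStr_iff h p).mp ha))

theorem altSkip_self (h : String) : altSkip h h = true := by
  simp [altSkip]

theorem altSkip_cases {h p : String} (hs : altSkip h p = true) : p = h ∨ ancStr h p = true := by
  rw [altSkip, Bool.or_eq_true, beq_iff_eq] at hs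
  rcases hs with hs | hs
  · left
    have := congrArg String.ofList hs
    simpa [String.ofList_toList] using this
  · right; exact (ancStr_iff h p).mpr ((PySem.Chars.startswith_iff _ _).mp hs)

theorem under_trans (h q x : String) (h1 : altSkip h q = true) (h2 : ancStr q x = true) :
    ancStr h x = true := by
  rcases altSkip_cases h1 with he | ha
  · rw [← he]; exact h2
  · have hms1 : mySplit h.toList <+: mySplit q.toList :=
      (mySplit_prefix_iff _ _).mpr (Or.inr ((ancStr_iff h q).mp ha))
    have hms2 : mySplit q.toList <+: mySplit x.toList :=
      (mySplit_prefix_iff _ _).mpr (Or.inr ((ancStr_iff q x).mp h2))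
    rcases (mySplit_prefix_iff _ _).mp (hms1.trans hms2) with he | hp
    · exfalso
      rw [he] at hms1
      have heq : mySplit q.toList = mySplit x.toList := List.Sublist.antisymm hms2.sublist hms1.sublist
      have hqx : q.toList = x.toList := by
        have := congrArg (PySem.Chars.join ['/']) heq
        rwa [join_mySplit, join_mySplit] at this
      rw [ancStr_iff, hqx] at h2
      have := h2.length_le
      simp at this
    · exact (ancStr_iff h x).mpr hp

-- ---- structural facts about altLoop (A's greedy pass) ----
theorem altLoop_eq_cons (h : String) (t : List String) :
    altLoop (h :: t) = h :: altLoop (t.dropWhile (altSkip h)) := by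
  simp [altLoop]

theorem altLoop_subset (l : List String) : ∀ x ∈ altLoop l, x ∈ l := by
  induction l using altLoop.induct with
  | case1 => simp [altLoop]
  | case2 h t ih =>
    intro x hx
    rw [altLoop_eq_cons] at hx
    rcases List.mem_cons.mp hx with he | hm
    · rw [he]; exact List.mem_cons_self
    · exact List.mem_cons_of_mem _ ((List.dropWhile_sublist _).subset (ih x hm))

theorem mem_dropWhile_of_not_skip {t : List String} {h x : String}
    (hxt : x ∈ t) (hns : ¬ altSkip h x = true) : x ∈ t.dropWhile (altSkip h) := by
  rcases List.mem_append.mp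
      (by rw [List.takeWhile_append_dropWhile]; exact hxt :
        x ∈ t.takeWhile (altSkip h) ++ t.dropWhile (altSkip h)) with h' | h'
  · exact absurd (List.mem_takeWhile_imp h') hns
  · exact h'

theorem takeWhile_le_dropWhile {t : List String} (hpw : t.Pairwise (· ≤ ·)) {a b : String}
    (ha : a ∈ t.takeWhile (altSkip h)) (hb : b ∈ t.dropWhile (altSkip h)) : a ≤ b := by
  have := (List.pairwise_append.mp (by
    rw [List.takeWhile_append_dropWhile]; exact hpw :
      (t.takeWhile (altSkip h) ++ t.dropWhile (altSkip h)).Pairwise (· ≤ ·))).2.2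
  exact this a ha b hb

theorem altLoop_mem_of_no_anc (l : List String) :
    ∀ x, x ∈ l → (∀ q ∈ l, ¬ ancStr q x = true) → x ∈ altLoop l := by
  induction l using altLoop.induct with
  | case1 => simp
  | case2 h t ih =>
    intro x hx hq
    rw [altLoop_eq_cons]
    by_cases hxh : x = h
    · rw [hxh]; exact List.mem_cons_self
    · have hxt : x ∈ t := by
        rcases List.mem_cons.mp hx with he | hm
        · exact absurd he hxh
        · exact hm
      refine List.mem_cons_of_mem _ (ih x ?_ ?_)
      · refine mem_dropWhile_of_not_skip hxt ?_
        intro hs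
        rcases altSkip_cases hs with he | ha
        · exact hxh he
        · exact hq h (List.mem_cons_self) ha
      · intro q hqd
        exact hq q (List.mem_cons_of_mem _ ((List.dropWhile_sublist _).subset hqd))

theorem altLoop_drop (l : List String) : l.Pairwise (· ≤ ·) →
    ∀ x q, q ∈ l → x ∈ l → ancStr q x = true →
      (∀ r ∈ l, q < r → r < x → ancStr q r = true) → x ∉ altLoop l := by
  induction l using altLoop.induct with
  | case1 => simp
  | case2 h t ih =>
    intro hpw x q hq hx hanc hunb hmem
    rw [altLoop_eq_cons] at hmem
    have hql : q < x := anc_lt q x hanc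
    have hhle : ∀ z ∈ t, h ≤ z := fun z hz => List.rel_of_pairwise_cons hpw hz
    have hhq : h ≤ q := by
      rcases List.mem_cons.mp hq with he | hm
      · exact le_of_eq he.symm
      · exact hhle q hm
    have hxh : x ≠ h := by
      intro he
      rw [he] at hql
      exact absurd (lt_of_le_of_lt hhq hql) (lt_irrefl h)
    rcases List.mem_cons.mp hmem with he | hm
    · exact hxh he
    have hxdw : x ∈ t.dropWhile (altSkip h) := altLoop_subset _ x hm
    have hpwt : t.Pairwise (· ≤ ·) := (List.pairwise_cons.mp hpw).2
    have hpwdw : (t.dropWhile (altSkip h)).Pairwise (· ≤ ·) :=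
      hpwt.sublist (List.dropWhile_sublist _)
    by_cases hqdw : q ∈ t.dropWhile (altSkip h)
    · exact ih hpwdw x q hqdw hxdw hanc
        (fun r hr h1 h2 =>
          hunb r (List.mem_cons_of_mem _ ((List.dropWhile_sublist _).subset hr)) h1 h2) hm
    · -- q is at or before h's dropped run: the last kept is (component-wise) below q
      have hunder : altSkip h q = true := by
        rcases List.mem_cons.mp hq with he | hqt
        · rw [he]; exact altSkip_self h
        · rcases List.mem_append.mp
              (by rw [List.takeWhile_append_dropWhile]; exact hqt :
                q ∈ t.takeWhile (altSkip h) ++ t.dropWhile (altSkip h)) with h' | h'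
          · exact List.mem_takeWhile_imp h'
          · exact absurd h' hqdw
      have hne : t.dropWhile (altSkip h) ≠ [] := List.ne_nil_of_mem hxdw
      obtain ⟨r0, rest, hr0⟩ := List.exists_cons_of_ne_nil hne
      have hr0p : altSkip h r0 = false := by
        have hd := List.head_dropWhile_not (altSkip h) hne
        have h1 : (t.dropWhile (altSkip h)).head? = some r0 := by rw [hr0]; rfl
        have h2 : (t.dropWhile (altSkip h)).head? = some ((t.dropWhile (altSkip h)).head hne) :=
          List.head?_eq_head hne
        have hh : (t.dropWhile (altSkip h)).head hne = r0 := by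
          rw [h2] at h1
          exact Option.some.inj h1
        rwa [hh] at hd
      have hr0t : r0 ∈ t := (List.dropWhile_sublist _).subset (by rw [hr0]; exact List.mem_cons_self)
      have hr0lex : r0 ≤ x := by
        rw [hr0] at hxdw hpwdw
        rcases List.mem_cons.mp hxdw with he | hm'
        · exact le_of_eq he.symm
        · exact List.rel_of_pairwise_cons hpwdw hm'
      have hqr0 : q ≤ r0 := by
        rcases List.mem_cons.mp hq with he | hqt
        · rw [he]; exact hhle r0 hr0t
        · have hqtw : q ∈ t.takeWhile (altSkip h) := by
            rcases List.mem_append.mp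
                (by rw [List.takeWhile_append_dropWhile]; exact hqt :
                  q ∈ t.takeWhile (altSkip h) ++ t.dropWhile (altSkip h)) with h' | h'
            · exact h'
            · exact absurd h' hqdw
          exact takeWhile_le_dropWhile hpwt hqtw (by rw [hr0]; exact List.mem_cons_self)
      have : altSkip h r0 = true := by
        rcases eq_or_lt_of_le hr0lex with he | hlt
        · rw [he]; exact altSkip_of_anc h x (under_trans h q x hunder hanc)
        · have hqr0' : q < r0 := by
            rcases eq_or_lt_of_le hqr0 with he' | h'
            · exact absurd (by rw [he', hr0]; exact List.mem_cons_self : q ∈ t.dropWhile (altSkip h)) hqdw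
            · exact h'
          exact altSkip_of_anc h r0
            (under_trans h q r0 hunder
              (hunb r0 (List.mem_cons_of_mem _ hr0t) hqr0' hlt))
      rw [this] at hr0p
      exact Bool.noConfusion hr0p

theorem altLoop_keep (l : List String) : l.Pairwise (· ≤ ·) →
    ∀ x, x ∈ l →
      (∀ q ∈ l, ancStr q x = true → ∃ r ∈ l, q < r ∧ r < x ∧ ancStr q r = false) →
      x ∈ altLoop l := by
  induction l using altLoop.induct with
  | case1 => simp
  | case2 h t ih =>
    intro hpw x hx hbr
    rw [altLoop_eq_cons]
    by_cases hxh : x = h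
    · rw [hxh]; exact List.mem_cons_self
    have hxt : x ∈ t := by
      rcases List.mem_cons.mp hx with he | hm
      · exact absurd he hxh
      · exact hm
    have hpwt : t.Pairwise (· ≤ ·) := (List.pairwise_cons.mp hpw).2
    have hhle : ∀ z ∈ t, h ≤ z := fun z hz => List.rel_of_pairwise_cons hpw hz
    have hxdw : x ∈ t.dropWhile (altSkip h) := by
      by_contra hnot
      have hxtw : x ∈ t.takeWhile (altSkip h) := by
        rcases List.mem_append.mp
            (by rw [List.takeWhile_append_dropWhile]; exact hxt :
              x ∈ t.takeWhile (altSkip h) ++ t.dropWhile (altSkip h)) with h' | h'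
        · exact h'
        · exact absurd h' hnot
      have hs := List.mem_takeWhile_imp hxtw
      rcases altSkip_cases hs with he | ha
      · exact hxh he
      obtain ⟨r, hrl, h1, h2, h3⟩ := hbr h (List.mem_cons_self) ha
      have hrt : r ∈ t := by
        rcases List.mem_cons.mp hrl with he | hm
        · rw [he] at h1; exact absurd h1 (lt_irrefl h)
        · exact hm
      rcases List.mem_append.mp
          (by rw [List.takeWhile_append_dropWhile]; exact hrt :
            r ∈ t.takeWhile (altSkip h) ++ t.dropWhile (altSkip h)) with h' | h'
      · have := List.mem_takeWhile_imp h'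
        rcases altSkip_cases this with he' | ha'
        · rw [he'] at h1; exact absurd h1 (lt_irrefl h)
        · rw [ha'] at h3; exact Bool.noConfusion h3
      · exact absurd h2 (not_lt_of_ge (takeWhile_le_dropWhile hpwt hxtw h'))
    refine List.mem_cons_of_mem _
      (ih (hpwt.sublist (List.dropWhile_sublist _)) x hxdw ?_)
    intro q hqdw hanc
    obtain ⟨r, hrl, h1, h2, h3⟩ :=
      hbr q (List.mem_cons_of_mem _ ((List.dropWhile_sublist _).subset hqdw)) hanc
    have hhq : h ≤ q := hhle q ((List.dropWhile_sublist _).subset hqdw)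
    have hrt : r ∈ t := by
      rcases List.mem_cons.mp hrl with he | hm
      · rw [he] at h1; exact absurd (lt_of_le_of_lt hhq h1) (lt_irrefl h)
      · exact hm
    have hrdw : r ∈ t.dropWhile (altSkip h) := by
      rcases List.mem_append.mp
          (by rw [List.takeWhile_append_dropWhile]; exact hrt :
            r ∈ t.takeWhile (altSkip h) ++ t.dropWhile (altSkip h)) with h' | h'
      · exact absurd h1 (not_lt_of_ge (takeWhile_le_dropWhile hpwt h' hqdw))
      · exact h'
    exact ⟨r, hrdw, h1, h2, h3⟩

theorem altLoop_sorted (l : List String) (hpw : l.Pairwise (· ≤ ·)) :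
    (altLoop l).Pairwise (· < ·) := by
  induction l using altLoop.induct with
  | case1 => simp [altLoop]
  | case2 h t ih =>
    rw [altLoop_eq_cons]
    have hpwt : t.Pairwise (· ≤ ·) := (List.pairwise_cons.mp hpw).2
    have hpwdw : (t.dropWhile (altSkip h)).Pairwise (· ≤ ·) :=
      hpwt.sublist (List.dropWhile_sublist _)
    refine List.pairwise_cons.mpr ⟨?_, ih hpwdw⟩
    intro y hy
    have hydw : y ∈ t.dropWhile (altSkip h) := altLoop_subset _ y hy
    have hne : t.dropWhile (altSkip h) ≠ [] := List.ne_nil_of_mem hydw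
    obtain ⟨r0, rest, hr0⟩ := List.exists_cons_of_ne_nil hne
    have hr0p : altSkip h r0 = false := by
      have hd := List.head_dropWhile_not (altSkip h) hne
      have h1 : (t.dropWhile (altSkip h)).head? = some r0 := by rw [hr0]; rfl
      have h2 : (t.dropWhile (altSkip h)).head? = some ((t.dropWhile (altSkip h)).head hne) :=
        List.head?_eq_head hne
      have hh : (t.dropWhile (altSkip h)).head hne = r0 := by
        rw [h2] at h1
        exact Option.some.inj h1
      rwa [hh] at hd
    have hr0t : r0 ∈ t := (List.dropWhile_sublist _).subset (by rw [hr0]; exact List.mem_cons_self)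
    have hhr0 : h < r0 := by
      rcases eq_or_lt_of_le (List.rel_of_pairwise_cons hpw hr0t) with he | hlt
      · exfalso; rw [← he, altSkip_self] at hr0p; exact Bool.noConfusion hr0p
      · exact hlt
    have hr0y : r0 ≤ y := by
      rw [hr0] at hydw hpwdw
      rcases List.mem_cons.mp hydw with he | hm
      · exact le_of_eq he.symm
      · exact List.rel_of_pairwise_cons hpwdw hm
    exact lt_of_lt_of_le hhr0 hr0y

-- ---- structural facts about bLoop (B's pass) ----
theorem bLoop_mem (present : PySem.Set String) (l : List String) :
    ∀ (prev : Option String), l.Pairwise (· ≤ ·) →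
      (∀ v, prev = some v → ∀ z ∈ l, v ≤ z) →
      ∀ x, (x ∈ bLoop present prev l ↔ x ∈ l ∧ prev ≠ some x ∧ bTest present x = false) := by
  induction l with
  | nil => intro prev _ _ x; simp [bLoop]
  | cons p t ih =>
    intro prev hpw hprev x
    have hplet : ∀ z ∈ t, p ≤ z := fun z hz => List.rel_of_pairwise_cons hpw hz
    have hih := ih (some p) (List.pairwise_cons.mp hpw).2
      (fun v hv z hz => by cases hv; exact hplet z hz) x
    by_cases hxp : x = p
    · subst hxp
      rw [bLoop]
      by_cases hc : some x ≠ prev ∧ bTest present x = false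
      · rw [if_pos hc]
        constructor
        · intro _; exact ⟨List.mem_cons_self, fun he => hc.1 he.symm, hc.2⟩
        · intro _; exact List.mem_cons_self
      · rw [if_neg hc]
        constructor
        · intro hmem
          have := hih.mp hmem
          exact absurd rfl this.2.1
        · rintro ⟨-, h1, h2⟩
          exact absurd ⟨fun he => h1 he.symm, h2⟩ hc
    · -- x ≠ p: the head keeps/skips p, never x; duplicates of x cannot reach prev here
      have hstep : x ∈ bLoop present prev (p :: t) ↔ x ∈ bLoop present (some p) t := by
        rw [bLoop]
        split
        · simp [hxp]
        · exact Iff.rfl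
      rw [hstep, hih]
      constructor
      · rintro ⟨hxt, -, hbt⟩
        refine ⟨List.mem_cons_of_mem _ hxt, ?_, hbt⟩
        intro he
        have hle1 : x ≤ p := hprev x he p (List.mem_cons_self)
        have hle2 : p ≤ x := hplet x hxt
        exact hxp (le_antisymm hle1 hle2)
      · rintro ⟨hxpt, -, hbt⟩
        have hxt : x ∈ t := by
          rcases List.mem_cons.mp hxpt with he | hm
          · exact absurd he hxp
          · exact hm
        exact ⟨hxt, fun he => hxp (by injection he with h; exact h.symm), hbt⟩

theorem bLoop_sorted (present : PySem.Set String) (l : List String) :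
    ∀ (prev : Option String), l.Pairwise (· ≤ ·) →
      (∀ v, prev = some v → ∀ z ∈ l, v ≤ z) →
      (bLoop present prev l).Pairwise (· < ·) ∧
        (∀ y ∈ bLoop present prev l, ∀ v, prev = some v → v < y) := by
  induction l with
  | nil => intro prev _ _; simp [bLoop]
  | cons p t ih =>
    intro prev hpw hprev
    have hplet : ∀ z ∈ t, p ≤ z := fun z hz => List.rel_of_pairwise_cons hpw hz
    obtain ⟨ihp, ihy⟩ := ih (some p) (List.pairwise_cons.mp hpw).2
      (fun v hv z hz => by cases hv; exact hplet z hz)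
    rw [bLoop]
    by_cases hc : some p ≠ prev ∧ bTest present p = false
    · rw [if_pos hc]
      refine ⟨List.pairwise_cons.mpr ⟨fun y hy => ihy y hy p rfl, ihp⟩, ?_⟩
      intro y hy v hv
      have hvp : v ≤ p := hprev v hv p (List.mem_cons_self)
      rcases List.mem_cons.mp hy with he | hm
      · subst he
        exact lt_of_le_of_ne hvp (fun he' => hc.1 (by rw [hv, he']))
      · exact lt_of_le_of_lt hvp (ihy y hm p rfl)
    · rw [if_neg hc]
      refine ⟨ihp, ?_⟩
      intro y hy v hv
      exact lt_of_le_of_lt (hprev v hv p (List.mem_cons_self)) (ihy y hy p rfl)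

-- ---- two strictly increasing lists with the same members are equal ----
theorem sorted_eq_of_mem_iff {l₁ l₂ : List String} (h1 : l₁.Pairwise (· < ·))
    (h2 : l₂.Pairwise (· < ·)) (hmem : ∀ x, x ∈ l₁ ↔ x ∈ l₂) : l₁ = l₂ :=
  PySem.List.eq_of_perm_of_pairwise_le
    ((List.perm_ext_iff_of_nodup (h1.imp ne_of_lt) (h2.imp ne_of_lt)).mpr hmem)
    (h1.imp le_of_lt) (h2.imp le_of_lt)

-- ---- assembly ----
theorem unchanged_main (paths : List String) (hnd : ¬ D_remove_subpaths_py paths) :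
    remove_subpaths_py paths = remove_subpaths_py_alt paths := by
  rw [A_eq_model, B_eq_model]
  by_cases hp : paths.isEmpty
  · rw [if_pos hp, if_pos hp]
  · rw [if_neg hp, if_neg hp]
    have hpw : (PySem.List.sorted paths (fun x => x) false).Pairwise (· ≤ ·) :=
      PySem.List.sorted_pairwise paths (fun x => x)
    have hmem : ∀ x : String, x ∈ PySem.List.sorted paths (fun x => x) false ↔ x ∈ paths :=
      fun x => PySem.List.mem_sorted paths (fun x => x) false x
    set s := PySem.List.sorted paths (fun x => x) false with hs
    congr 1
    refine sorted_eq_of_mem_iff (altLoop_sorted s hpw)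
      (bLoop_sorted _ s none hpw (fun v hv => nomatch hv)).1 ?_
    intro x
    rw [bLoop_mem _ s none hpw (fun v hv => nomatch hv) x]
    constructor
    · intro hx
      have hxs : x ∈ s := altLoop_subset s x hx
      refine ⟨hxs, by simp, ?_⟩
      by_contra hbt
      have hbt' : bTest (PySem.Set.ofList s) x = true := by
        revert hbt
        cases bTest (PySem.Set.ofList s) x <;> simp
      obtain ⟨q, hq, hanc⟩ := (bTest_iff s x).mp hbt'
      unfold D_remove_subpaths_py at hnd
      push_neg at hnd
      obtain ⟨q', hq', hanc', hunb⟩ :=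
        hnd x ((hmem x).mp hxs) ⟨q, (hmem q).mp hq, hanc⟩
      refine absurd hx (altLoop_drop s hpw x q' ((hmem q').mpr hq') hxs hanc' ?_)
      intro r hr h1 h2
      have := hunb r ((hmem r).mp hr) h1 h2
      simpa using this
    · rintro ⟨hxs, -, hbt⟩
      refine altLoop_mem_of_no_anc s x hxs ?_
      intro q hq hanc
      have : bTest (PySem.Set.ofList s) x = true := (bTest_iff s x).mpr ⟨q, hq, hanc⟩
      rw [hbt] at this
      exact Bool.noConfusion this

theorem tight_main (paths : List String) (hd : D_remove_subpaths_py paths) :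
    remove_subpaths_py paths ≠ remove_subpaths_py_alt paths := by
  obtain ⟨p, hpmem, ⟨q, hqmem, hanc⟩, hbr⟩ := hd
  have hne : paths.isEmpty = false := by
    cases paths with
    | nil => simp at hpmem
    | cons a t => rfl
  rw [A_eq_model, B_eq_model, if_neg (by simp [hne]), if_neg (by simp [hne])]
  have hpw : (PySem.List.sorted paths (fun x => x) false).Pairwise (· ≤ ·) :=
    PySem.List.sorted_pairwise paths (fun x => x)
  have hmem : ∀ x : String, x ∈ PySem.List.sorted paths (fun x => x) false ↔ x ∈ paths :=
    fun x => PySem.List.mem_sorted paths (fun x => x) false x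
  set s := PySem.List.sorted paths (fun x => x) false with hs
  intro heq
  have heq' : altLoop s = bLoop (PySem.Set.ofList s) none s := Option.some.inj heq
  have hpA : p ∈ altLoop s := by
    refine altLoop_keep s hpw p ((hmem p).mpr hpmem) ?_
    intro q' hq' hanc'
    obtain ⟨r, hr, h1, h2, h3⟩ := hbr q' ((hmem q').mp hq') hanc'
    exact ⟨r, (hmem r).mpr hr, h1, h2, Bool.eq_false_iff.mpr h3⟩
  have hpB : p ∉ bLoop (PySem.Set.ofList s) none s := by
    rw [bLoop_mem _ s none hpw (fun v hv => nomatch hv) p]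
    rintro ⟨-, -, hbt⟩
    have : bTest (PySem.Set.ofList s) p = true :=
      (bTest_iff s p).mpr ⟨q, (hmem q).mpr hqmem, hanc⟩
    rw [hbt] at this
    exact Bool.noConfusion this
  rw [heq'] at hpA
  exact hpB hpA

-- ---- evaluating both ports at the difference witness (String '<' is not kernel-reducible,
-- so the sort is discharged by sorted_eq_self_of_pairwise and the rest by decide) ----
theorem wit_lt1 : ("/a" : String) < "/a!" :=
  String.lt_iff_toList_lt.mpr ((List.lt_iff_lex_lt _ _).mpr
    (List.Lex.cons (List.Lex.cons List.Lex.nil)))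

theorem wit_lt2 : ("/a!" : String) < "/a/b" :=
  String.lt_iff_toList_lt.mpr ((List.lt_iff_lex_lt _ _).mpr
    (List.Lex.cons (List.Lex.cons (List.Lex.rel (by decide)))))

theorem wit_pairwise :
    List.Pairwise (fun a b => (fun x : String => x) a ≤ (fun x : String => x) b)
      ["/a", "/a!", "/a/b"] := by
  refine List.pairwise_cons.mpr ⟨?_, List.pairwise_cons.mpr ⟨?_, List.pairwise_singleton _ _⟩⟩
  · intro b hb
    rcases List.mem_cons.mp hb with he | hb
    · subst he; exact le_of_lt wit_lt1
    · rcases List.mem_cons.mp hb with he | hb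
      · subst he; exact le_of_lt (lt_trans wit_lt1 wit_lt2)
      · simp at hb
  · intro b hb
    rcases List.mem_cons.mp hb with he | hb
    · subst he; exact le_of_lt wit_lt2
    · simp at hb

theorem wit_sorted :
    PySem.List.sorted ["/a", "/a!", "/a/b"] (fun x : String => x) false
      = ["/a", "/a!", "/a/b"] :=
  PySem.List.sorted_eq_self_of_pairwise _ _ wit_pairwise

theorem wit_A : remove_subpaths_py pvDiffWitness_remove_subpaths_py
    = some ["/a", "/a!", "/a/b"] := by
  show remove_subpaths_py ["/a", "/a!", "/a/b"] = _
  simp only [remove_subpaths_py, wit_sorted]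
  decide

theorem wit_B : remove_subpaths_py_alt pvDiffWitness_remove_subpaths_py
    = some ["/a", "/a!"] := by
  show remove_subpaths_py_alt ["/a", "/a!", "/a/b"] = _
  simp only [remove_subpaths_py_alt, wit_sorted]
  decide

-- ===== VERDICT (by name: the statements are the Claim_ definitions above) =====
theorem remove_subpaths_py_spec : Claim_unchanged_remove_subpaths_py := by
  intro paths _
  unfold Spec_remove_subpaths_py
  intro hnd
  exact unchanged_main paths hnd

theorem remove_subpaths_py_changed : Claim_changed_remove_subpaths_py := by
  unfold Claim_changed_remove_subpaths_py
  refine ⟨by decide, ?_, wit_A, wit_B, by decide⟩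
  show D_remove_subpaths_py ["/a", "/a!", "/a/b"]
  refine ⟨"/a/b", by decide, ⟨"/a", by decide, by decide⟩, ?_⟩
  intro q hq hanc
  fin_cases hq
  · exact ⟨"/a!", by decide, wit_lt1, wit_lt2, by decide⟩
  · exact absurd hanc (by decide)
  · exact absurd hanc (by decide)

theorem remove_subpaths_py_tight : Claim_exact_remove_subpaths_py := by
  intro paths _ hd
  exact tight_main paths hd
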